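-- pv_equiv track=rewrite | github.com/notesby/CARDALG | Method 3/.ipynb_checkpoints/helpers-checkpoint.py | getLevelClass
-- ===== SOURCE A (Python) =====
-- def getLevelClass(levels):
--     res = {}
--     for cls in levels:
--         for lvl in levels[cls]:
--             if lvl not in res:
--                 res[lvl] = {}
--             for item in levels[cls][lvl]:
--                 itemstr = str(item[0])
--                 if itemstr not in res[lvl]:
--                     res[lvl][itemstr] = {}
--                 if cls not in res[lvl][itemstr]:
--                     res[lvl][itemstr][cls] = 0
--                 res[lvl][itemstr][cls] += item[1]
--     return res
-- ===== SOURCE B (Python) =====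
-- def getLevelClass(levels):
--     # Phase 1: one flat summing table per level, keyed by (itemstr, cls).
--     flat = {}
--     for cls, lvlmap in levels.items():
--         for lvl, items in lvlmap.items():
--             table = flat.setdefault(lvl, {})
--             for item in items:
--                 key = (str(item[0]), cls)
--                 table[key] = table.get(key, 0) + item[1]
--     # Phase 2: reshape each flat table into the nested item -> cls -> total dict.
--     res = {}
--     for lvl, table in flat.items():
--         nested = {}
--         for (itemstr, cls), total in table.items():
--             nested.setdefault(itemstr, {})[cls] = total
--         res[lvl] = nested
--     return res
-- ===== Notes on version B (the rewrite author's own statement) =====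
-- stated objective: alternative
-- what changed: Replaces A's one-shot triply-nested dict build (three nested membership tests and an in-place += per item) with a two-phase decomposition: phase 1 sums every (item, cls) pair into one flat table per level with a single get-or-0 update, phase 2 reshapes each flat table into the nested item -> cls -> total dict, preserving first-encounter order.
import Mathlib
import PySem

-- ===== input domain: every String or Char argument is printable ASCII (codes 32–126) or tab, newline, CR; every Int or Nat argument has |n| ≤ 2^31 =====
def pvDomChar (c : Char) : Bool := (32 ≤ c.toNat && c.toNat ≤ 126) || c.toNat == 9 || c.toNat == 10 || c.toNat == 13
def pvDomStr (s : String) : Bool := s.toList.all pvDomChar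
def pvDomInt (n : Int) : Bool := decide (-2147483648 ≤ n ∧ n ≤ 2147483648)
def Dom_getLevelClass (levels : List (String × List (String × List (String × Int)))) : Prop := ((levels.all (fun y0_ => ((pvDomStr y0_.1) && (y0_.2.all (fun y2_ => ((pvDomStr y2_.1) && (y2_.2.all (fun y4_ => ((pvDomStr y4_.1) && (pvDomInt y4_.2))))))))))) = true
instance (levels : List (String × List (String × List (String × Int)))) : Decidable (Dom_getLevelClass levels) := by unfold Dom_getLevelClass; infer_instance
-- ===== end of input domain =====

-- B regroups via a flat per-level summing table keyed (item, cls) and a second reshape pass,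
-- instead of A's one-shot triply-nested dict build (objective: alternative decomposition, same cost).

-- Python dict primitives on association lists (first match; assignment overwrites in place, new keys append).
def dGetD {K V : Type} [DecidableEq K] (d : List (K × V)) (k : K) (dflt : V) : V :=
  match d with
  | [] => dflt
  | (k', v) :: rest => if k' = k then v else dGetD rest k dflt

def dMem {K V : Type} [DecidableEq K] (d : List (K × V)) (k : K) : Bool :=
  match d with
  | [] => false
  | (k', _) :: rest => decide (k' = k) || dMem rest k

def dSet {K V : Type} [DecidableEq K] (d : List (K × V)) (k : K) (v : V) : List (K × V) :=
  match d with
  | [] => [(k, v)]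
  | (k', v') :: rest => if k' = k then (k', v) :: rest else (k', v') :: dSet rest k v

-- ===== PORT A =====
-- body of A's innermost `for item in levels[cls][lvl]` loop
def aItem (cls lvl : String) (res : List (String × List (String × List (String × Int)))) (item : String × Int) : List (String × List (String × List (String × Int))) :=
  let itemstr := item.1                                   -- str(item[0]); item[0] is already a str
  let m1 := dGetD res lvl []
  let m1 := if dMem m1 itemstr then m1 else dSet m1 itemstr []   -- if itemstr not in res[lvl]: res[lvl][itemstr] = {}
  let m2 := dGetD m1 itemstr []
  let m2 := if dMem m2 cls then m2 else dSet m2 cls 0            -- if cls not in res[lvl][itemstr]: ... = 0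
  let m2 := dSet m2 cls (dGetD m2 cls 0 + item.2)                -- res[lvl][itemstr][cls] += item[1]
  dSet res lvl (dSet m1 itemstr m2)

def getLevelClass (levels : List (String × List (String × List (String × Int)))) : List (String × List (String × List (String × Int))) :=
  levels.foldl (fun res p =>                               -- for cls in levels
    p.2.foldl (fun res q =>                                -- for lvl in levels[cls]
      let res := if dMem res q.1 then res else dSet res q.1 []   -- if lvl not in res: res[lvl] = {}
      q.2.foldl (aItem p.1 q.1) res) res) []

-- ===== PORT B =====
def flatAdd (t : List ((String × String) × Int)) (k : String × String) (v : Int) : List ((String × String) × Int) :=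
  dSet t k (dGetD t k 0 + v)                               -- table[key] = table.get(key, 0) + item[1]

-- body of B's phase-1 innermost loop
def bItem (cls lvl : String) (flat : List (String × List ((String × String) × Int))) (item : String × Int) : List (String × List ((String × String) × Int)) :=
  dSet flat lvl (flatAdd (dGetD flat lvl []) (item.1, cls) item.2)

-- B phase 1: one flat summing table per level, keyed (itemstr, cls)
def buildFlat (levels : List (String × List (String × List (String × Int)))) : List (String × List ((String × String) × Int)) :=
  levels.foldl (fun flat p =>
    p.2.foldl (fun flat q =>
      let flat := if dMem flat q.1 then flat else dSet flat q.1 []   -- flat.setdefault(lvl, {})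
      q.2.foldl (bItem p.1 q.1) flat) flat) []

-- body of B's phase-2 loop: nested.setdefault(itemstr, {})[cls] = total
def rStep (acc : List (String × List (String × Int))) (e : (String × String) × Int) : List (String × List (String × Int)) :=
  dSet acc e.1.1 (dSet (dGetD acc e.1.1 []) e.1.2 e.2)

-- B phase 2: reshape one flat table into the nested item -> cls -> total dict
def regroup (t : List ((String × String) × Int)) : List (String × List (String × Int)) :=
  t.foldl rStep []

def getLevelClass_alt (levels : List (String × List (String × List (String × Int)))) : List (String × List (String × List (String × Int))) :=
  (buildFlat levels).map (fun p => (p.1, regroup p.2))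

-- ===== PRECONDITION & SPEC =====
def Spec_getLevelClass (levels : List (String × List (String × List (String × Int)))) (out : List (String × List (String × List (String × Int)))) : Prop := out = getLevelClass_alt levels
instance (levels : List (String × List (String × List (String × Int)))) (out : List (String × List (String × List (String × Int)))) : Decidable (Spec_getLevelClass levels out) := by unfold Spec_getLevelClass; infer_instance

-- ===== CLAIM (what is proved, stated in full; the proofs are below) =====
def Claim_equal_getLevelClass : Prop := ∀ (levels : List (String × List (String × List (String × Int)))), Dom_getLevelClass levels → Spec_getLevelClass levels (getLevelClass levels)

-- ===== LEMMAS AND PROOFS =====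

def mapVals {K V W : Type} (f : V → W) (d : List (K × V)) : List (K × W) :=
  d.map (fun p => (p.1, f p.2))

def keysND {K V : Type} (d : List (K × V)) : Prop := (d.map Prod.fst).Nodup

def FlatOK (flat : List (String × List ((String × String) × Int))) : Prop :=
  ∀ p ∈ flat, keysND p.2

-- A's inner five statements as a function of res[lvl]
def aInner (m1 : List (String × List (String × Int))) (i c : String) (v : Int) : List (String × List (String × Int)) :=
  let m1' := if dMem m1 i then m1 else dSet m1 i []
  let m2 := dGetD m1' i []
  let m2 := if dMem m2 c then m2 else dSet m2 c 0
  let m2 := dSet m2 c (dGetD m2 c 0 + v)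
  dSet m1' i m2

theorem aItem_eq (cls lvl : String) (res : List (String × List (String × List (String × Int)))) (item : String × Int) :
    aItem cls lvl res item = dSet res lvl (aInner (dGetD res lvl []) item.1 cls item.2) := rfl

theorem dGetD_dSet_self {K V : Type} [DecidableEq K] (d : List (K × V)) (k : K) (v dflt : V) :
    dGetD (dSet d k v) k dflt = v := by
  induction d with
  | nil => simp [dSet, dGetD]
  | cons hd tl ih =>
    obtain ⟨k0, v0⟩ := hd
    by_cases h : k0 = k <;> simp [dSet, dGetD, h, ih]

theorem dGetD_dSet_ne {K V : Type} [DecidableEq K] (d : List (K × V)) (k k' : K) (v dflt : V)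
    (h : k' ≠ k) : dGetD (dSet d k v) k' dflt = dGetD d k' dflt := by
  induction d with
  | nil => simp [dSet, dGetD, Ne.symm h]
  | cons hd tl ih =>
    obtain ⟨k0, v0⟩ := hd
    by_cases h1 : k0 = k
    · subst h1; simp [dSet, dGetD, Ne.symm h]
    · by_cases h2 : k0 = k'
      · subst h2; simp [dSet, dGetD, h1]
      · simp [dSet, dGetD, h1, h2, ih]

theorem dSet_dSet_self {K V : Type} [DecidableEq K] (d : List (K × V)) (k : K) (v w : V) :
    dSet (dSet d k v) k w = dSet d k w := by
  induction d with
  | nil => simp [dSet]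
  | cons hd tl ih =>
    obtain ⟨k0, v0⟩ := hd
    by_cases h : k0 = k <;> simp [dSet, h, ih]

theorem dMem_dSet {K V : Type} [DecidableEq K] (d : List (K × V)) (k x : K) (v : V) :
    dMem (dSet d k v) x = (decide (k = x) || dMem d x) := by
  induction d with
  | nil => simp [dSet, dMem]
  | cons hd tl ih =>
    obtain ⟨k0, v0⟩ := hd
    by_cases h : k0 = k
    · subst h; simp [dSet, dMem]
    · simp [dSet, dMem, h, ih, Bool.or_left_comm]

-- writing an already-present key never reorders, so it commutes with any other write
theorem dSet_comm_mem {K V : Type} [DecidableEq K] (d : List (K × V)) (k k' : K) (v w : V)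
    (h : k ≠ k') (hm : dMem d k = true) :
    dSet (dSet d k v) k' w = dSet (dSet d k' w) k v := by
  induction d with
  | nil => simp [dMem] at hm
  | cons hd tl ih =>
    obtain ⟨k0, v0⟩ := hd
    by_cases h1 : k0 = k
    · subst h1
      simp [dSet, h]
    · by_cases h2 : k0 = k'
      · subst h2
        simp [dSet, h1]
      · have hm' : dMem tl k = true := by
          simpa [dMem, h1] using hm
        simp [dSet, h1, h2, ih hm']

theorem dGetD_of_not_mem {K V : Type} [DecidableEq K] (d : List (K × V)) (k : K) (dflt : V)
    (h : dMem d k = false) : dGetD d k dflt = dflt := by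
  induction d with
  | nil => simp [dGetD]
  | cons hd tl ih =>
    simp only [dMem, Bool.or_eq_false_iff, decide_eq_false_iff_not] at h
    simp [dGetD, h.1, ih h.2]

theorem dMem_iff_mem {K V : Type} [DecidableEq K] (d : List (K × V)) (k : K) :
    dMem d k = true ↔ k ∈ d.map Prod.fst := by
  induction d with
  | nil => simp [dMem]
  | cons hd tl ih =>
    simp only [dMem, List.map_cons, List.mem_cons, Bool.or_eq_true, decide_eq_true_eq, ih]
    exact or_congr eq_comm Iff.rfl

theorem keys_dSet {K V : Type} [DecidableEq K] (d : List (K × V)) (k : K) (v : V) :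
    (dSet d k v).map Prod.fst = if dMem d k = true then d.map Prod.fst else d.map Prod.fst ++ [k] := by
  induction d with
  | nil => simp [dSet, dMem]
  | cons hd tl ih =>
    obtain ⟨k0, v0⟩ := hd
    by_cases h : k0 = k
    · subst h; simp [dSet, dMem]
    · have hd : (decide (k0 = k) || dMem tl k) = dMem tl k := by simp [h]
      simp only [dSet, if_neg h, List.map_cons, dMem, hd, ih]
      by_cases hm : dMem tl k = true
      · simp [hm]
      · simp [hm]

theorem keysND_dSet {K V : Type} [DecidableEq K] (d : List (K × V)) (k : K) (v : V)
    (h : keysND d) : keysND (dSet d k v) := by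
  unfold keysND at *
  rw [keys_dSet]
  by_cases hm : dMem d k = true
  · rw [if_pos hm]; exact h
  · rw [if_neg hm]
    refine List.Nodup.append h (List.nodup_singleton k) ?_
    intro a ha hb
    rw [List.mem_singleton] at hb
    rw [hb] at ha
    exact absurd ((dMem_iff_mem d k).mpr ha) (by simp [hm])

theorem dGetD_mapVals {K V W : Type} [DecidableEq K] (f : V → W) (d : List (K × V)) (k : K) (dflt : V) :
    dGetD (mapVals f d) k (f dflt) = f (dGetD d k dflt) := by
  induction d with
  | nil => simp [mapVals, dGetD]
  | cons hd tl ih =>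
    by_cases h : hd.1 = k
    · simp [mapVals, dGetD, h]
    · simp only [mapVals, List.map_cons, dGetD, if_neg h] at *
      exact ih

theorem dSet_mapVals {K V W : Type} [DecidableEq K] (f : V → W) (d : List (K × V)) (k : K) (v : V) :
    dSet (mapVals f d) k (f v) = mapVals f (dSet d k v) := by
  induction d with
  | nil => simp [mapVals, dSet]
  | cons hd tl ih =>
    by_cases h : hd.1 = k
    · simp [mapVals, dSet, h]
    · simp only [mapVals, List.map_cons, dSet, if_neg h] at *
      simp [ih]

theorem dMem_mapVals {K V W : Type} [DecidableEq K] (f : V → W) (d : List (K × V)) (k : K) :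
    dMem (mapVals f d) k = dMem d k := by
  induction d with
  | nil => simp [mapVals, dMem]
  | cons hd tl ih =>
    simp only [mapVals, List.map_cons, dMem] at *
    rw [ih]

-- outer keys only grow under rStep
theorem dMem_rStep (acc : List (String × List (String × Int))) (e : (String × String) × Int)
    (i : String) (h : dMem acc i = true) : dMem (rStep acc e) i = true := by
  simp [rStep, dMem_dSet, h]

-- inner keys only grow under rStep
theorem dMem_inner_rStep (acc : List (String × List (String × Int))) (e : (String × String) × Int)
    (i c : String) (h : dMem (dGetD acc i []) c = true) :
    dMem (dGetD (rStep acc e) i []) c = true := by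
  by_cases hi : e.1.1 = i
  · subst hi
    simp [rStep, dGetD_dSet_self, dMem_dSet, h]
  · simp [rStep, dGetD_dSet_ne _ _ _ _ _ (Ne.symm hi), h]

-- rStep with equal outer+inner key overwrites the previous rStep
theorem rStep_rStep_self (acc : List (String × List (String × Int))) (i c : String) (v w : Int) :
    rStep (rStep acc ((i, c), v)) ((i, c), w) = rStep acc ((i, c), w) := by
  simp [rStep, dGetD_dSet_self, dSet_dSet_self]

-- an in-place rStep (both keys present) commutes with any rStep at a different key
theorem rStep_comm_mem (acc : List (String × List (String × Int))) (i c : String) (w : Int)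
    (e : (String × String) × Int) (hne : e.1 ≠ (i, c))
    (hi : dMem acc i = true) (hc : dMem (dGetD acc i []) c = true) :
    rStep (rStep acc ((i, c), w)) e = rStep (rStep acc e) ((i, c), w) := by
  obtain ⟨⟨i', c'⟩, v'⟩ := e
  by_cases hii : i' = i
  · subst hii
    have hcc : c' ≠ c := fun he => hne (by simp [he])
    simp only [rStep, dGetD_dSet_self, dSet_dSet_self]
    rw [dSet_comm_mem _ c c' _ _ (Ne.symm hcc) hc]
  · simp only [rStep, dGetD_dSet_ne _ _ _ _ _ hii, dGetD_dSet_ne _ _ _ _ _ (Ne.symm hii)]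
    rw [dSet_comm_mem _ i i' _ _ (Ne.symm hii) hi]

theorem foldl_rStep_comm (t : List ((String × String) × Int)) (acc : List (String × List (String × Int)))
    (i c : String) (w : Int) (h : (i, c) ∉ t.map Prod.fst)
    (hi : dMem acc i = true) (hc : dMem (dGetD acc i []) c = true) :
    t.foldl rStep (rStep acc ((i, c), w)) = rStep (t.foldl rStep acc) ((i, c), w) := by
  induction t generalizing acc with
  | nil => rfl
  | cons hd tl ih =>
    simp only [List.map_cons, List.mem_cons] at h
    push Not at h
    have hne : hd.1 ≠ (i, c) := Ne.symm h.1
    simp only [List.foldl_cons]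
    rw [rStep_comm_mem acc i c w hd hne hi hc]
    exact ih (rStep acc hd) h.2 (dMem_rStep _ _ _ hi) (dMem_inner_rStep _ _ _ _ hc)

-- regroup commutes with a flat-table write (unique flat keys)
theorem regroup_dSet (t : List ((String × String) × Int)) (acc : List (String × List (String × Int)))
    (i c : String) (w : Int) (h : keysND t) :
    (dSet t (i, c) w).foldl rStep acc = rStep (t.foldl rStep acc) ((i, c), w) := by
  induction t generalizing acc with
  | nil => rfl
  | cons hd tl ih =>
    obtain ⟨k0, v0⟩ := hd
    unfold keysND at h
    simp only [List.map_cons, List.nodup_cons] at h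
    by_cases h0 : k0 = (i, c)
    · subst h0
      have hset : dSet (((i, c), v0) :: tl) (i, c) w = ((i, c), w) :: tl := by
        simp [dSet]
      have hin : dMem (rStep acc ((i, c), v0)) i = true := by
        simp [rStep, dMem_dSet]
      have hic : dMem (dGetD (rStep acc ((i, c), v0)) i []) c = true := by
        simp [rStep, dGetD_dSet_self, dMem_dSet]
      have h1 : rStep acc ((i, c), w) = rStep (rStep acc ((i, c), v0)) ((i, c), w) :=
        (rStep_rStep_self acc i c v0 w).symm
      rw [hset, List.foldl_cons, List.foldl_cons, h1,
        foldl_rStep_comm tl _ i c w h.1 hin hic]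
    · have hset : dSet ((k0, v0) :: tl) (i, c) w = (k0, v0) :: dSet tl (i, c) w := by
        simp [dSet, h0]
      rw [hset, List.foldl_cons, List.foldl_cons]
      exact ih (rStep acc (k0, v0)) h.2

-- a write at a different (item, cls) key does not change the nested lookup
theorem nestedGet_rStep_ne (acc : List (String × List (String × Int))) (e : (String × String) × Int)
    (i c : String) (h : e.1 ≠ (i, c)) :
    dGetD (dGetD (rStep acc e) i []) c 0 = dGetD (dGetD acc i []) c 0 := by
  obtain ⟨⟨i', c'⟩, v'⟩ := e
  by_cases hii : i' = i
  · subst hii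
    have hcc : c' ≠ c := fun he => h (by simp [he])
    simp [rStep, dGetD_dSet_self, dGetD_dSet_ne _ _ _ _ _ (Ne.symm hcc)]
  · simp [rStep, dGetD_dSet_ne _ _ _ _ _ (Ne.symm hii)]

-- reading a key not in the flat table is unchanged by the reshape of that table
theorem nestedGet_unchanged (t : List ((String × String) × Int)) (acc : List (String × List (String × Int)))
    (i c : String) (h : (i, c) ∉ t.map Prod.fst) :
    dGetD (dGetD (t.foldl rStep acc) i []) c 0 = dGetD (dGetD acc i []) c 0 := by
  induction t generalizing acc with
  | nil => rfl
  | cons hd tl ih =>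
    simp only [List.map_cons, List.mem_cons] at h
    push Not at h
    rw [List.foldl_cons, ih _ h.2, nestedGet_rStep_ne acc hd i c (Ne.symm h.1)]

-- nested get after reshape = flat get (key present, unique flat keys)
theorem nestedGet_present (t : List ((String × String) × Int)) (acc : List (String × List (String × Int)))
    (i c : String) (h : keysND t) (hm : (i, c) ∈ t.map Prod.fst) :
    dGetD (dGetD (t.foldl rStep acc) i []) c 0 = dGetD t (i, c) 0 := by
  induction t generalizing acc with
  | nil => simp at hm
  | cons hd tl ih =>
    obtain ⟨k0, v0⟩ := hd
    unfold keysND at h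
    simp only [List.map_cons, List.nodup_cons] at h
    by_cases h0 : k0 = (i, c)
    · subst h0
      rw [List.foldl_cons, nestedGet_unchanged tl _ i c h.1]
      simp [rStep, dGetD, dGetD_dSet_self]
    · simp only [List.map_cons, List.mem_cons] at hm
      rcases hm with hm | hm
      · exact absurd hm.symm h0
      · rw [List.foldl_cons, ih _ (show keysND tl from h.2) hm]
        simp [dGetD, h0]

-- A's inner statements collapse to one rStep at the summed value
theorem aInner_eq_rStep (m1 : List (String × List (String × Int))) (i c : String) (v : Int) :
    aInner m1 i c v = rStep m1 ((i, c), dGetD (dGetD m1 i []) c 0 + v) := by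
  unfold aInner rStep
  by_cases hi : dMem m1 i = true
  · simp only [hi, if_true]
    by_cases hc : dMem (dGetD m1 i []) c = true
    · simp [hc]
    · simp only [Bool.not_eq_true] at hc
      simp [hc, dGetD_dSet_self, dSet_dSet_self, dGetD_of_not_mem _ _ _ hc]
  · simp only [Bool.not_eq_true] at hi
    simp only [hi, Bool.false_eq_true, if_false]
    rw [dGetD_dSet_self, dGetD_of_not_mem _ _ _ hi]
    simp only [dMem, dGetD, Bool.false_eq_true, if_false]
    rw [dSet_dSet_self, dGetD_dSet_self]
    simp [dSet]

-- the core: regroup of one flat summing write = A's inner statements on the regrouped table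
theorem regroup_flatAdd (t : List ((String × String) × Int)) (i c : String) (v : Int)
    (h : keysND t) : regroup (flatAdd t (i, c) v) = aInner (regroup t) i c v := by
  unfold flatAdd regroup
  rw [regroup_dSet t [] i c _ h, aInner_eq_rStep]
  by_cases hm : dMem t (i, c) = true
  · rw [nestedGet_present t [] i c h (by simpa using (dMem_iff_mem t (i, c)).mp hm)]
  · have hm' : (i, c) ∉ t.map Prod.fst := fun hx => by
      simp [(dMem_iff_mem t (i, c)).mpr hx] at hm
    rw [nestedGet_unchanged t [] i c hm', dGetD_of_not_mem _ _ _ (by simpa using hm)]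
    rfl

theorem keysND_dGetD (flat : List (String × List ((String × String) × Int))) (lvl : String)
    (h : FlatOK flat) : keysND (dGetD flat lvl []) := by
  induction flat with
  | nil => exact List.nodup_nil
  | cons hd tl ih =>
    by_cases he : hd.1 = lvl
    · simpa [dGetD, he] using h hd (by simp)
    · simp only [dGetD, if_neg he]
      exact ih (fun p hp => h p (List.mem_cons_of_mem _ hp))

theorem FlatOK_dSet (flat : List (String × List ((String × String) × Int))) (lvl : String)
    (v : List ((String × String) × Int)) (h : FlatOK flat) (hv : keysND v) :
    FlatOK (dSet flat lvl v) := by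
  induction flat with
  | nil =>
    intro p hp
    simp only [dSet, List.mem_singleton] at hp
    simpa [hp] using hv
  | cons hd tl ih =>
    intro p hp
    by_cases he : hd.1 = lvl
    · simp only [dSet, if_pos he, List.mem_cons] at hp
      rcases hp with hp | hp
      · simpa [hp] using hv
      · exact h p (List.mem_cons_of_mem _ hp)
    · simp only [dSet, if_neg he, List.mem_cons] at hp
      rcases hp with hp | hp
      · exact h p (by simp [hp])
      · exact ih (fun q hq => h q (List.mem_cons_of_mem _ hq)) p hp

-- one item step preserves the simulation
theorem item_step (cls lvl : String) (item : String × Int)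
    (flat : List (String × List ((String × String) × Int))) (h : FlatOK flat) :
    aItem cls lvl (mapVals regroup flat) item = mapVals regroup (bItem cls lvl flat item) ∧
      FlatOK (bItem cls lvl flat item) := by
  have hget : dGetD (mapVals regroup flat) lvl [] = regroup (dGetD flat lvl []) :=
    dGetD_mapVals regroup flat lvl []
  have hnd : keysND (dGetD flat lvl []) := keysND_dGetD flat lvl h
  constructor
  · rw [aItem_eq, hget, regroup_flatAdd _ _ _ _ hnd |>.symm]
    exact dSet_mapVals regroup flat lvl _
  · exact FlatOK_dSet flat lvl _ h (keysND_dSet _ _ _ hnd)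

theorem items_fold (cls lvl : String) (items : List (String × Int))
    (flat : List (String × List ((String × String) × Int))) (h : FlatOK flat) :
    items.foldl (aItem cls lvl) (mapVals regroup flat) = mapVals regroup (items.foldl (bItem cls lvl) flat) ∧
      FlatOK (items.foldl (bItem cls lvl) flat) := by
  induction items generalizing flat with
  | nil => exact ⟨rfl, h⟩
  | cons hd tl ih =>
    obtain ⟨h1, h2⟩ := item_step cls lvl hd flat h
    simpa [h1] using ih _ h2

theorem ensure_step (lvl : String) (flat : List (String × List ((String × String) × Int))) (h : FlatOK flat) :
    ((if dMem (mapVals regroup flat) lvl then mapVals regroup flat else dSet (mapVals regroup flat) lvl []) =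
      mapVals regroup (if dMem flat lvl then flat else dSet flat lvl [])) ∧
      FlatOK (if dMem flat lvl then flat else dSet flat lvl []) := by
  rw [dMem_mapVals]
  by_cases hm : dMem flat lvl
  · simp [hm, h]
  · simp only [hm, Bool.false_eq_true, if_false]
    constructor
    · have : ([] : List (String × List (String × Int))) = regroup [] := rfl
      rw [this, dSet_mapVals]
    · exact FlatOK_dSet _ _ _ h List.nodup_nil

theorem levels_fold (levels : List (String × List (String × List (String × Int))))
    (flat : List (String × List ((String × String) × Int))) (h : FlatOK flat) :
    levels.foldl (fun res p =>
        p.2.foldl (fun res q =>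
          let res := if dMem res q.1 then res else dSet res q.1 []
          q.2.foldl (aItem p.1 q.1) res) res) (mapVals regroup flat) =
      mapVals regroup (levels.foldl (fun flat p =>
        p.2.foldl (fun flat q =>
          let flat := if dMem flat q.1 then flat else dSet flat q.1 []
          q.2.foldl (bItem p.1 q.1) flat) flat) flat) ∧
      FlatOK (levels.foldl (fun flat p =>
        p.2.foldl (fun flat q =>
          let flat := if dMem flat q.1 then flat else dSet flat q.1 []
          q.2.foldl (bItem p.1 q.1) flat) flat) flat) := by
  induction levels generalizing flat with
  | nil => exact ⟨rfl, h⟩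
  | cons cl tl ih =>
    suffices hs : ∀ (lvls : List (String × List (String × Int))) flat, FlatOK flat →
        (lvls.foldl (fun res q =>
          let res := if dMem res q.1 then res else dSet res q.1 []
          q.2.foldl (aItem cl.1 q.1) res) (mapVals regroup flat) =
        mapVals regroup (lvls.foldl (fun flat q =>
          let flat := if dMem flat q.1 then flat else dSet flat q.1 []
          q.2.foldl (bItem cl.1 q.1) flat) flat)) ∧
        FlatOK (lvls.foldl (fun flat q =>
          let flat := if dMem flat q.1 then flat else dSet flat q.1 []
          q.2.foldl (bItem cl.1 q.1) flat) flat) by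
      obtain ⟨h1, h2⟩ := hs cl.2 flat h
      simpa [h1] using ih _ h2
    intro lvls
    induction lvls with
    | nil => exact fun flat h => ⟨rfl, h⟩
    | cons q tlq ihq =>
      intro flat h
      obtain ⟨h1, h2⟩ := ensure_step q.1 flat h
      obtain ⟨h3, h4⟩ := items_fold cl.1 q.1 q.2 _ h2
      simp only [List.foldl_cons]
      rw [← h1] at h3
      obtain ⟨h5, h6⟩ := ihq _ h4
      exact ⟨by simp only [h3, h5], h6⟩

-- ===== VERDICT (by name: the statement is the Claim_ definition above) =====
theorem getLevelClass_spec : Claim_equal_getLevelClass := by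
  intro levels _
  unfold Spec_getLevelClass getLevelClass getLevelClass_alt buildFlat
  have h := levels_fold levels [] (fun p hp => by simp at hp)
  exact h.1
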